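-- pv_equiv track=rewrite | github.com/981377660LMT/algorithm-study | 13_回溯算法/剪枝优化/1655. 分配重复整数.py | canDistribute2
-- ===== SOURCE A (Python) =====
-- from functools import lru_cache
-- from typing import List, Tuple
-- from collections import Counter, defaultdict
--
-- def canDistribute2(nums: List[int], quantity: List[int]) -> bool:
--     """记忆化dp来优化回溯解法
--
--     `1815. 得到新鲜甜甜圈的最多组数-回溯+元组记忆化`
--
--     注意这道题比1815多了一个贪心的思想
--     即确定quantity中的每一个数值应该放到哪个容器中 肯定是贪心选择放多的容器 直接把容器数量降成了m
--
--     """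
--
--     @lru_cache(None)
--     def dfs(index: int, remain: Tuple[int, ...]) -> bool:
--         if index == n:
--             return True
--
--         for i, num in enumerate(remain):
--             if num >= quantity[index]:
--                 # !注意这里要保持顺序 否则就起不到记忆化的效果
--                 nextRemain = sorted(remain[:i] + (num - quantity[index],) + remain[i + 1 :])
--                 if dfs(index + 1, tuple(nextRemain)):
--                     return True
--
--         return False
--
--     n = len(quantity)
--     remain = sorted(Counter(nums).values(), reverse=True)[:n]
--
--     res = dfs(0, tuple(remain))
--     dfs.cache_clear()
--     return res
-- ===== SOURCE B (Python) =====
-- from typing import List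
-- from collections import Counter
--
--
-- def canDistribute2(nums: List[int], quantity: List[int]) -> bool:
--     """Iterative level-by-level frontier search instead of memoized recursive
--     backtracking: the set of reachable capacity multisets (as sorted tuples)
--     is advanced once per demand; the answer is whether any state survives."""
--     caps = sorted(Counter(nums).values(), reverse=True)[: len(quantity)]
--     frontier = {tuple(sorted(caps))}
--     for q in quantity:
--         nxt = set()
--         for state in frontier:
--             for c in set(state):
--                 if c >= q:
--                     rest = list(state)
--                     rest.remove(c)
--                     nxt.add(tuple(sorted(rest + [c - q])))
--         frontier = nxt
--     return len(frontier) > 0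
-- ===== Notes on version B (the rewrite author's own statement) =====
-- stated objective: alternative
-- what changed: Memoized recursive backtracking (DFS over (index, sorted remain-tuple) with lru_cache and early exit) is replaced by an iterative breadth-first frontier search: a set of reachable capacity multisets is advanced one demand at a time, deduplicating states per level, and the answer is whether the final frontier is non-empty.
import Mathlib
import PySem

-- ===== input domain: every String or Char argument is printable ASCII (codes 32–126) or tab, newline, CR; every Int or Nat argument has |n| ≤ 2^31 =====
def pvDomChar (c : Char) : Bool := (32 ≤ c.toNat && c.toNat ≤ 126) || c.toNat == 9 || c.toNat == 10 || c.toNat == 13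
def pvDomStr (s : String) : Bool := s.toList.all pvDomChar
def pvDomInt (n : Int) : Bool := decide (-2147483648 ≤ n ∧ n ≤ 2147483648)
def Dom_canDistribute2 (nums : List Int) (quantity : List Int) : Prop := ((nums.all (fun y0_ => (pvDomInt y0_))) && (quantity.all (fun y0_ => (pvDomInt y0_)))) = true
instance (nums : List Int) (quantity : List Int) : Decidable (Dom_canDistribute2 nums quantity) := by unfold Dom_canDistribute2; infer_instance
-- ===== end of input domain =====

-- B replaces A's memoized recursive backtracking by an iterative level-by-level frontier
-- search over the same capacity-multiset states (objective: alternative, not claimed faster).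

-- ===== PORT A =====
-- A's dfs: the lru_cache is elided (caching never changes the returned value); the pair
-- (index, n) is realized as structural recursion on the not-yet-served suffix of quantity
-- (exact: A only ever calls dfs with 0 ≤ index ≤ n, and `index == n` ⟺ the suffix is []).
def pvDfsA (quantity : List Int) (remain : List Int) : Bool :=
  match quantity with
  | [] => true                                     -- if index == n: return True
  | q :: qtail =>                                  -- q = quantity[index]
    -- for i, num in enumerate(remain): if num >= quantity[index]: ... early `return True` = any
    (PySem.List.enumerate remain 0).any (fun p =>
      if q ≤ p.2 then
        -- nextRemain = sorted(remain[:i] + (num - quantity[index],) + remain[i + 1:])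
        pvDfsA qtail (PySem.List.sorted
          (PySem.List.slice remain none (some p.1) ++ [p.2 - q] ++ PySem.List.slice remain (some (p.1 + 1)) none)
          (fun x => x) false)
      else false)

def canDistribute2 (nums : List Int) (quantity : List Int) : Bool :=
  -- n = len(quantity); remain = sorted(Counter(nums).values(), reverse=True)[:n]
  let remain := PySem.List.slice
    (PySem.List.sorted (PySem.Dict.values (PySem.Dict.counter nums)) (fun x => x) true)
    none (some (quantity.length : Int))
  -- res = dfs(0, tuple(remain)); dfs.cache_clear(); return res
  pvDfsA quantity remain

-- ===== PORT B =====
-- one level step: nxt = set(); for state in frontier: for c in set(state):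
--   if c >= q: rest = list(state); rest.remove(c); nxt.add(tuple(sorted(rest + [c - q])))
def pvBfsStep (frontier : PySem.Set (List Int)) (q : Int) : PySem.Set (List Int) :=
  frontier.foldl (fun nxt state =>
    (PySem.Set.ofList state).foldl (fun nxt2 c =>
      if q ≤ c then
        -- rest.remove(c) never raises: c was drawn from set(state), so the getD default is unreachable
        PySem.Set.add nxt2 (PySem.List.sorted ((PySem.List.remove? state c).getD [] ++ [c - q]) (fun x => x) false)
      else nxt2) nxt) PySem.Set.empty

def canDistribute2_alt (nums : List Int) (quantity : List Int) : Bool :=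
  -- caps = sorted(Counter(nums).values(), reverse=True)[:len(quantity)]
  let caps := PySem.List.slice
    (PySem.List.sorted (PySem.Dict.values (PySem.Dict.counter nums)) (fun x => x) true)
    none (some (quantity.length : Int))
  -- frontier = {tuple(sorted(caps))}
  let init : PySem.Set (List Int) := PySem.Set.add PySem.Set.empty (PySem.List.sorted caps (fun x => x) false)
  -- for q in quantity: frontier = step(frontier, q)
  let frontier := quantity.foldl pvBfsStep init
  -- return len(frontier) > 0
  decide (0 < PySem.Set.len frontier)

-- ===== PRECONDITION & SPEC =====
def Spec_canDistribute2 (nums : List Int) (quantity : List Int) (out : Bool) : Prop := out = canDistribute2_alt nums quantity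
instance (nums : List Int) (quantity : List Int) (out : Bool) : Decidable (Spec_canDistribute2 nums quantity out) := by unfold Spec_canDistribute2; infer_instance

-- ===== CLAIM (what is proved, stated in full; the proofs are below) =====
def Claim_equal_canDistribute2 : Prop := ∀ (nums : List Int) (quantity : List Int), Dom_canDistribute2 nums quantity → Spec_canDistribute2 nums quantity (canDistribute2 nums quantity)

-- ===== LEMMAS AND PROOFS =====

-- The common mathematical content: the demands qs can be served from the multiset m of
-- remaining capacities (serve the head demand from some capacity c ≥ q, then the rest).
def FeasP : List Int → Multiset Int → Prop
  | [], _ => True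
  | q :: qs, m => ∃ c ∈ m, q ≤ c ∧ FeasP qs ((c - q) ::ₘ m.erase c)

-- replacing position k of l by y has the multiset of `y ::ₘ (↑l).erase l[k]`
lemma multiset_set_at (l : List Int) (k : Nat) (h : k < l.length) (y : Int) :
    ((l.take k ++ [y] ++ l.drop (k + 1) : List Int) : Multiset Int)
      = y ::ₘ (l : Multiset Int).erase l[k] := by
  have hl : l = l.take k ++ l[k] :: l.drop (k + 1) := by
    conv_lhs => rw [← List.take_append_drop k l]
    rw [List.drop_eq_getElem_cons h]
  have hmem : l[k] ∈ l := List.getElem_mem h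
  have h2 : List.Perm l (l[k] :: l.erase l[k]) := List.perm_cons_erase hmem
  have h3' : List.Perm l (l[k] :: (l.take k ++ l.drop (k + 1))) := by
    conv_lhs => rw [hl]
    exact List.perm_middle
  have h4 : List.Perm (l.erase l[k]) (l.take k ++ l.drop (k + 1)) :=
    List.Perm.cons_inv (h2.symm.trans h3')
  rw [Multiset.coe_erase]
  have hc : (y ::ₘ (↑(l.erase l[k]) : Multiset Int)) = ((y :: l.erase l[k] : List Int) : Multiset Int) := rfl
  rw [hc, Multiset.coe_eq_coe]
  have h5 : List.Perm (l.take k ++ [y] ++ l.drop (k + 1)) (y :: (l.take k ++ l.drop (k + 1))) := by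
    have hm := List.perm_middle (a := y) (l₁ := l.take k) (l₂ := l.drop (k+1))
    simp only [List.append_assoc, List.singleton_append] at hm ⊢
    exact hm
  exact h5.trans ((h4.symm).cons y)

lemma sorted_coe (L : List Int) :
    ((PySem.List.sorted L (fun x => x) false : List Int) : Multiset Int) = (L : Multiset Int) :=
  Multiset.coe_eq_coe.mpr (PySem.List.sorted_perm L (fun x => x) false)

lemma succ_coe (remain : List Int) (q : Int) (k : Nat) (hk : k < remain.length) :
    ((PySem.List.sorted
        (PySem.List.slice remain none (some ((0 : Int) + (k : Int))) ++ [remain[k] - q]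
          ++ PySem.List.slice remain (some (((0 : Int) + (k : Int)) + 1)) none)
        (fun x => x) false : List Int) : Multiset Int)
      = (remain[k] - q) ::ₘ (remain : Multiset Int).erase remain[k] := by
  rw [sorted_coe]
  have h1 : (0 : Int) + (k : Int) = ((k : Nat) : Int) := zero_add _
  have h2 : (k : Int) + 1 = (((k + 1 : Nat)) : Int) := (Nat.cast_add_one k).symm
  rw [h1, h2, PySem.List.slice_to_natCast, PySem.List.slice_from_natCast]
  exact multiset_set_at remain k hk _

lemma dfsA_iff (qs : List Int) : ∀ (remain : List Int),
    pvDfsA qs remain = true ↔ FeasP qs (remain : Multiset Int) := by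
  induction qs with
  | nil => intro remain; simp [pvDfsA, FeasP]
  | cons q qtail ih =>
    intro remain
    show ((PySem.List.enumerate remain 0).any _) = true ↔ _
    rw [List.any_eq_true]
    constructor
    · rintro ⟨p, hp, hf⟩
      rw [PySem.List.mem_enumerate_iff] at hp
      obtain ⟨k, hk, rfl⟩ := hp
      simp only at hf
      split_ifs at hf with hq
      · refine ⟨remain[k], List.getElem_mem hk, hq, ?_⟩
        have hrec := (ih _).mp hf
        rwa [succ_coe remain q k hk] at hrec
    · rintro ⟨c, hc, hq, hfeas⟩
      obtain ⟨k, hk, hck⟩ := List.getElem_of_mem hc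
      subst hck
      refine ⟨((0 : Int) + (k : Int), remain[k]), ?_, ?_⟩
      · rw [PySem.List.mem_enumerate_iff]; exact ⟨k, hk, rfl⟩
      · simp only
        rw [if_pos hq, ih, succ_coe remain q k hk]
        exact hfeas

-- membership in one frontier-advancing step
lemma mem_foldl_add_if {β : Type} (l : List β) (p : β → Prop) [DecidablePred p]
    (f : β → List Int) : ∀ (init : PySem.Set (List Int)) (x : List Int),
    (x ∈ l.foldl (fun s c => if p c then PySem.Set.add s (f c) else s) init) ↔
      x ∈ init ∨ ∃ c ∈ l, p c ∧ x = f c := by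
  induction l with
  | nil => intro init x; simp
  | cons a t ih =>
    intro init x
    rw [List.foldl_cons]
    by_cases hp : p a
    · rw [if_pos hp, ih, PySem.Set.mem_add]
      constructor
      · rintro (⟨hx | rfl⟩ | ⟨c, hc, hpc, rfl⟩)
        · exact Or.inl hx
        · exact Or.inr ⟨a, List.mem_cons_self .., hp, rfl⟩
        · exact Or.inr ⟨c, List.mem_cons_of_mem _ hc, hpc, rfl⟩
      · rintro (hx | ⟨c, hc, hpc, rfl⟩)
        · exact Or.inl (Or.inl hx)
        · rcases List.mem_cons.mp hc with rfl | hc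
          · exact Or.inl (Or.inr rfl)
          · exact Or.inr ⟨c, hc, hpc, rfl⟩
    · rw [if_neg hp, ih]
      constructor
      · rintro (hx | ⟨c, hc, hpc, rfl⟩)
        · exact Or.inl hx
        · exact Or.inr ⟨c, List.mem_cons_of_mem _ hc, hpc, rfl⟩
      · rintro (hx | ⟨c, hc, hpc, rfl⟩)
        · exact Or.inl hx
        · rcases List.mem_cons.mp hc with rfl | hc
          · exact absurd hpc hp
          · exact Or.inr ⟨c, hc, hpc, rfl⟩

lemma mem_step_aux (q : Int) (fr : List (List Int)) : ∀ (init : PySem.Set (List Int)) (x : List Int),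
    x ∈ fr.foldl (fun nxt state =>
      (PySem.Set.ofList state).foldl (fun nxt2 c =>
        if q ≤ c then
          PySem.Set.add nxt2 (PySem.List.sorted ((PySem.List.remove? state c).getD [] ++ [c - q]) (fun x => x) false)
        else nxt2) nxt) init ↔
      x ∈ init ∨ ∃ s ∈ fr, ∃ c ∈ s, q ≤ c ∧
        x = PySem.List.sorted (s.erase c ++ [c - q]) (fun y => y) false := by
  induction fr with
  | nil => intro init x; simp
  | cons s t ih =>
    intro init x
    rw [List.foldl_cons, ih,
      mem_foldl_add_if (PySem.Set.ofList s) (fun c => q ≤ c)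
        (fun c => PySem.List.sorted ((PySem.List.remove? s c).getD [] ++ [c - q]) (fun x => x) false) init x]
    have hrw : ∀ c, c ∈ s →
        PySem.List.sorted ((PySem.List.remove? s c).getD [] ++ [c - q]) (fun x => x) false
          = PySem.List.sorted (s.erase c ++ [c - q]) (fun y => y) false := by
      intro c hc
      rw [PySem.List.remove?_eq_some_erase s c hc]
      rfl
    constructor
    · rintro (⟨hx | ⟨c, hc, hq, rfl⟩⟩ | ⟨s', hs', c, hc, hq, rfl⟩)
      · exact Or.inl hx
      · rw [PySem.Set.mem_ofList] at hc
        exact Or.inr ⟨s, List.mem_cons_self .., c, hc, hq, hrw c hc⟩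
      · exact Or.inr ⟨s', List.mem_cons_of_mem _ hs', c, hc, hq, rfl⟩
    · rintro (hx | ⟨s', hs', c, hc, hq, rfl⟩)
      · exact Or.inl (Or.inl hx)
      · rcases List.mem_cons.mp hs' with rfl | hs'
        · exact Or.inl (Or.inr ⟨c, (PySem.Set.mem_ofList _ _).mpr hc, hq, (hrw c hc).symm⟩)
        · exact Or.inr ⟨s', hs', c, hc, hq, rfl⟩

lemma mem_pvBfsStep (frontier : PySem.Set (List Int)) (q : Int) (x : List Int) :
    x ∈ pvBfsStep frontier q ↔
      ∃ s ∈ frontier, ∃ c ∈ s, q ≤ c ∧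
        x = PySem.List.sorted (s.erase c ++ [c - q]) (fun y => y) false := by
  rw [pvBfsStep, mem_step_aux]
  simp [PySem.Set.empty]

lemma coe_erase_append (s : List Int) (c q : Int) :
    ((s.erase c ++ [c - q] : List Int) : Multiset Int) = (c - q) ::ₘ (s : Multiset Int).erase c := by
  rw [Multiset.coe_erase]
  have hc : ((c - q) ::ₘ ((s.erase c : List Int) : Multiset Int))
      = (((c - q) :: s.erase c : List Int) : Multiset Int) := rfl
  rw [hc, Multiset.coe_eq_coe]
  exact List.perm_append_singleton _ _

lemma bfs_iff (qs : List Int) : ∀ (frontier : PySem.Set (List Int)),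
    (qs.foldl pvBfsStep frontier ≠ []) ↔ ∃ s ∈ frontier, FeasP qs (s : Multiset Int) := by
  induction qs with
  | nil =>
    intro fr
    constructor
    · intro h
      match fr, h with
      | a :: t, _ => exact ⟨a, List.mem_cons_self .., trivial⟩
    · rintro ⟨s, hs, -⟩
      exact List.ne_nil_of_mem hs
  | cons q qt ih =>
    intro fr
    rw [List.foldl_cons, ih]
    constructor
    · rintro ⟨s', hs', hf⟩
      rw [mem_pvBfsStep] at hs'
      obtain ⟨s, hsfr, c, hcs, hq, rfl⟩ := hs'
      refine ⟨s, hsfr, c, Multiset.mem_coe.mpr hcs, hq, ?_⟩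
      rwa [sorted_coe, coe_erase_append] at hf
    · rintro ⟨s, hsfr, c, hcs, hq, hf⟩
      refine ⟨PySem.List.sorted (s.erase c ++ [c - q]) (fun y => y) false, ?_, ?_⟩
      · rw [mem_pvBfsStep]
        exact ⟨s, hsfr, c, Multiset.mem_coe.mp hcs, hq, rfl⟩
      · rwa [sorted_coe, coe_erase_append]

-- ===== VERDICT (by name: the statement is the Claim_ definition above) =====
theorem canDistribute2_spec : Claim_equal_canDistribute2 := by
  unfold Claim_equal_canDistribute2
  intro nums quantity _
  unfold Spec_canDistribute2 canDistribute2 canDistribute2_alt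
  set R := PySem.List.slice
    (PySem.List.sorted (PySem.Dict.values (PySem.Dict.counter nums)) (fun x => x) true)
    none (some (quantity.length : Int)) with hR
  have hinit : PySem.Set.add (PySem.Set.empty : PySem.Set (List Int))
      (PySem.List.sorted R (fun x => x) false) = [PySem.List.sorted R (fun x => x) false] := rfl
  have hB := bfs_iff quantity ([PySem.List.sorted R (fun x => x) false] : PySem.Set (List Int))
  have hA := dfsA_iff quantity R
  have hlen : ∀ (F : PySem.Set (List Int)), (decide (0 < PySem.Set.len F) = true) ↔ F ≠ [] := by
    intro F
    rw [decide_eq_true_iff]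
    cases F <;> simp [PySem.Set.len]
  rw [Bool.eq_iff_iff, hA, hlen, hinit, hB]
  constructor
  · intro h
    exact ⟨_, List.mem_singleton_self _, by rwa [sorted_coe]⟩
  · rintro ⟨s, hs, hf⟩
    rw [List.mem_singleton] at hs
    subst hs
    rwa [sorted_coe] at hf
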